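-- pv_equiv track=rewrite | github.com/kalletolonen/tira1 | ex3/listsplit.py | count
-- ===== SOURCE A (Python) =====
-- def count(t):
--     n = len(t)
--     left_minimum = [0] * n
--     right_minimum = [0] * n
--     count = 0
--
--     left_minimum[0] = t[0]
--     for i in range(1, n):
--         left_minimum[i] = min(left_minimum[i - 1], t[i])
--
--     right_minimum[n - 1] = t[n - 1]
--     for i in range(n - 2, -1, -1):
--         right_minimum[i] = min(right_minimum[i + 1], t[i])
--
--     for i in range(1, n):
--         if left_minimum[i - 1] == right_minimum[i]:
--             count += 1
--
--     return count
-- ===== SOURCE B (Python) =====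
-- def count(t):
--     # A split counts iff both halves contain the global minimum, so valid
--     # splits are exactly the indices i with first_occurrence < i <= last_occurrence.
--     m = t[0]
--     first = 0
--     last = 0
--     for i, x in enumerate(t[1:], 1):
--         if x < m:
--             m, first, last = x, i, i
--         elif x == m:
--             last = i
--     return last - first
-- ===== Notes on version B (the rewrite author's own statement) =====
-- stated objective: simpler
-- what changed: Replaced the prefix-minimum and suffix-minimum arrays plus a split-counting loop with a single pass that tracks the global minimum and its first and last occurrence indices, returning last - first.
import Mathlib
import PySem

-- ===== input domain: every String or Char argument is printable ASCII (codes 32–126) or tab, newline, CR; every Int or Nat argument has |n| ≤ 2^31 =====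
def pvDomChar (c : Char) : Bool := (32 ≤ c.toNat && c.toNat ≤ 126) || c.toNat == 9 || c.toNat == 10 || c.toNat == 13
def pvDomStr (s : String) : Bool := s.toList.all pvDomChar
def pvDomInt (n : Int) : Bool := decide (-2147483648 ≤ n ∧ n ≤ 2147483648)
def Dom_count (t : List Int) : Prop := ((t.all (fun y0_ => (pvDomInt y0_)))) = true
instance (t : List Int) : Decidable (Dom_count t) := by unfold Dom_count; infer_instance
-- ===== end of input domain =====

-- B replaces A's prefix/suffix-minimum arrays and split-counting loop with one pass that
-- tracks the minimum's first and last occurrence (the count is last - first): simpler, O(1) extra space.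


-- ===== PORT A =====
def count (t : List Int) : Int :=
  let n : Int := (t.length : Int)
  let leftMin : List Int := List.replicate t.length 0
  let rightMin : List Int := List.replicate t.length 0
  let leftMin := PySem.List.pySetD leftMin 0 (PySem.List.pyGetD t 0 0)
  let leftMin := (PySem.List.pyRange 1 n 1).foldl
    (fun lm i => PySem.List.pySetD lm i
      (min (PySem.List.pyGetD lm (i - 1) 0) (PySem.List.pyGetD t i 0))) leftMin
  let rightMin := PySem.List.pySetD rightMin (n - 1) (PySem.List.pyGetD t (n - 1) 0)
  let rightMin := (PySem.List.pyRange (n - 2) (-1) (-1)).foldl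
    (fun rm i => PySem.List.pySetD rm i
      (min (PySem.List.pyGetD rm (i + 1) 0) (PySem.List.pyGetD t i 0))) rightMin
  (PySem.List.pyRange 1 n 1).foldl
    (fun c i => if PySem.List.pyGetD leftMin (i - 1) 0 = PySem.List.pyGetD rightMin i 0
                then c + 1 else c) 0

-- ===== PORT B =====
def count_alt (t : List Int) : Int :=
  let s : Int × Int × Int := (PySem.List.pyGetD t 0 0, 0, 0)
  let s := (PySem.List.enumerate (PySem.List.slice t (some 1) none) 1).foldl
    (fun (s : Int × Int × Int) (p : Int × Int) =>
      if p.2 < s.1 then (p.2, p.1, p.1)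
      else if p.2 = s.1 then (s.1, s.2.1, p.1)
      else s) s
  s.2.2 - s.2.1

-- ===== PRECONDITION & SPEC =====
-- Pre_ excludes only the empty list, on which the Python A raises IndexError (t[0]).
def Pre_count (t : List Int) : Prop := t ≠ []
instance (t : List Int) : Decidable (Pre_count t) := by unfold Pre_count; infer_instance
def pvWitness_count : List Int := [2, 1, 1, 3]

def Spec_count (t : List Int) (out : Int) : Prop := out = count_alt t
instance (t : List Int) (out : Int) : Decidable (Spec_count t out) := by unfold Spec_count; infer_instance

-- ===== CLAIM (what is proved, stated in full; the proofs are below) =====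
def Claim_equal_count : Prop := ∀ (t : List Int), Dom_count t → Pre_count t → Spec_count t (count t)

-- ===== LEMMAS AND PROOFS =====
def minv (l : List Int) : Int := (PySem.List.min? l (fun y => y)).getD 0
def fI (l : List Int) : Nat := l.idxOf (minv l)
def lI (l : List Int) : Nat := l.length - 1 - l.reverse.idxOf (minv l)

theorem minv_cons (x : Int) (xs : List Int) : minv (x :: xs) = xs.foldl min x := by
  simp [minv, PySem.List.min?_id_cons]

theorem minv_mem {l : List Int} (h : l ≠ []) : minv l ∈ l := by
  cases hm : PySem.List.min? l (fun y => y) with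
  | none => exact absurd ((PySem.List.min?_eq_none_iff l _).1 hm) h
  | some m =>
    have := PySem.List.min?_mem hm
    simpa [minv, hm] using this

theorem minv_le {l : List Int} {y : Int} (hy : y ∈ l) : minv l ≤ y := by
  cases hm : PySem.List.min? l (fun y => y) with
  | none =>
    rw [PySem.List.min?_eq_none_iff] at hm; subst hm; cases hy
  | some m =>
    have := PySem.List.min?_isMin hm y hy
    simpa [minv, hm] using this

theorem foldl_min_shift (l : List Int) : ∀ a b : Int, l.foldl min (min a b) = min a (l.foldl min b) := by
  induction l with
  | nil => intro a b; rfl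
  | cons c l ih =>
    intro a b
    simp only [List.foldl_cons]
    rw [min_assoc, ih]

theorem minv_cons' (a : Int) {l : List Int} (h : l ≠ []) : minv (a :: l) = min a (minv l) := by
  obtain ⟨b, l', rfl⟩ := List.exists_cons_of_ne_nil h
  rw [minv_cons, minv_cons]
  simp only [List.foldl_cons]
  rw [show min a b = min a b from rfl]
  have := foldl_min_shift l' a b
  simpa using this

theorem minv_snoc {l : List Int} (h : l ≠ []) (y : Int) : minv (l ++ [y]) = min (minv l) y := by
  obtain ⟨a, l', rfl⟩ := List.exists_cons_of_ne_nil h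
  rw [minv_cons]
  rw [List.cons_append, minv_cons, List.foldl_append]
  rfl

theorem mem_take_iff (l : List Int) (v : Int) : ∀ (j : Nat), v ∈ l.take j ↔ v ∈ l ∧ l.idxOf v < j := by
  induction l with
  | nil => intro j; simp
  | cons a tl ih =>
    intro j
    cases j with
    | zero => simp
    | succ j =>
      by_cases hv : a = v
      · subst hv; simp [List.idxOf_cons_self]
      · rw [List.take_succ_cons]
        simp only [List.mem_cons, List.idxOf_cons_ne _ hv, ih j]
        constructor
        · rintro (h | ⟨h1, h2⟩)
          · exact absurd h.symm hv
          · exact ⟨Or.inr h1, by omega⟩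
        · rintro ⟨h1 | h1, h2⟩
          · exact absurd h1.symm hv
          · exact Or.inr ⟨h1, by omega⟩

theorem mem_drop_iff (l : List Int) (v : Int) (j : Nat) :
    v ∈ l.drop j ↔ v ∈ l ∧ j + l.reverse.idxOf v < l.length := by
  have h1 : v ∈ l.drop j ↔ v ∈ (l.drop j).reverse := (List.mem_reverse).symm
  rw [h1, List.reverse_drop, mem_take_iff]
  rw [List.mem_reverse]
  constructor
  · rintro ⟨h, h2⟩
    have := List.idxOf_lt_length_of_mem ((List.mem_reverse).2 h)
    rw [List.length_reverse] at this
    exact ⟨h, by omega⟩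
  · rintro ⟨h, h2⟩
    exact ⟨h, by omega⟩

theorem idxOf_le_of_getElem {l : List Int} {k : Nat} (hk : k < l.length) :
    l.idxOf l[k] ≤ k := by
  have hmem : l[k] ∈ l.take (k + 1) := by
    have : (l.take (k+1))[k]'(by simp; omega) = l[k] := List.getElem_take
    exact this ▸ List.getElem_mem _
  have := (mem_take_iff l l[k] (k+1)).1 hmem
  omega

theorem minv_take_eq {t : List Int} (ht : t ≠ []) {j : Nat} (h1 : 1 ≤ j) :
    minv (t.take j) = minv t ↔ t.idxOf (minv t) < j := by
  have hne : t.take j ≠ [] := by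
    cases t with
    | nil => exact absurd rfl ht
    | cons a tl => cases j with
      | zero => omega
      | succ j => simp
  constructor
  · intro heq
    have : minv t ∈ t.take j := heq ▸ minv_mem hne
    exact ((mem_take_iff t _ j).1 this).2
  · intro hlt
    have hmem : minv t ∈ t.take j := (mem_take_iff t _ j).2 ⟨minv_mem ht, hlt⟩
    have h2 : minv (t.take j) ≤ minv t := minv_le hmem
    have h3 : minv t ≤ minv (t.take j) :=
      minv_le (List.mem_of_mem_take (minv_mem hne))
    omega
theorem minv_drop_eq {t : List Int} (ht : t ≠ []) {j : Nat} (hj : j < t.length) :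
    minv (t.drop j) = minv t ↔ j + t.reverse.idxOf (minv t) < t.length := by
  have hne : t.drop j ≠ [] := by
    intro h
    have := congrArg List.length h
    simp at this; omega
  constructor
  · intro heq
    have : minv t ∈ t.drop j := heq ▸ minv_mem hne
    exact ((mem_drop_iff t _ j).1 this).2
  · intro hlt
    have hmem : minv t ∈ t.drop j := (mem_drop_iff t _ j).2 ⟨minv_mem ht, hlt⟩
    have h2 : minv (t.drop j) ≤ minv t := minv_le hmem
    have h3 : minv t ≤ minv (t.drop j) :=
      minv_le (List.mem_of_mem_drop (minv_mem hne))
    omega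

theorem key_iff {t : List Int} (ht : t ≠ []) {j : Nat} (h1 : 1 ≤ j) (hj : j < t.length) :
    (minv (t.take j) = minv (t.drop j)) ↔ (fI t < j ∧ j ≤ lI t) := by
  have hr : t.reverse.idxOf (minv t) < t.length := by
    have := List.idxOf_lt_length_of_mem ((List.mem_reverse).2 (minv_mem ht))
    simpa using this
  have hboth : (minv (t.take j) = minv (t.drop j)) ↔
      (minv (t.take j) = minv t ∧ minv (t.drop j) = minv t) := by
    constructor
    · intro heq
      have hne1 : t.take j ≠ [] := by
        cases t with
        | nil => exact absurd rfl ht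
        | cons a tl => cases j with
          | zero => omega
          | succ j => simp
      have hne2 : t.drop j ≠ [] := by
        intro h; have := congrArg List.length h; simp at this; omega
      have ha : minv t ≤ minv (t.take j) := minv_le (List.mem_of_mem_take (minv_mem hne1))
      have hb : minv t ≤ minv (t.drop j) := minv_le (List.mem_of_mem_drop (minv_mem hne2))
      have hsplit : minv t ∈ t.take j ∨ minv t ∈ t.drop j := by
        have : minv t ∈ t.take j ++ t.drop j := by
          rw [List.take_append_drop]; exact minv_mem ht
        exact List.mem_append.1 this
      rcases hsplit with hm | hm
      · have := minv_le (l := t.take j) hm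
        constructor <;> omega
      · have := minv_le (l := t.drop j) hm
        constructor <;> omega
    · rintro ⟨ha, hb⟩; omega
  rw [hboth, minv_take_eq ht h1, minv_drop_eq ht hj]
  unfold fI lI
  omega

theorem fI_le_lI {t : List Int} (ht : t ≠ []) : fI t ≤ lI t := by
  have hr : t.reverse.idxOf (minv t) < t.length := by
    have := List.idxOf_lt_length_of_mem ((List.mem_reverse).2 (minv_mem ht))
    simpa using this
  set r := t.reverse.idxOf (minv t) with hrdef
  have hget : t[t.length - 1 - r]'(by omega) = minv t := by
    have h1 : t.reverse[r]'(by simpa using hr) = minv t :=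
      List.getElem_idxOf (List.idxOf_lt_length_of_mem ((List.mem_reverse).2 (minv_mem ht)))
    rw [List.getElem_reverse] at h1
    simpa using h1
  have := idxOf_le_of_getElem (l := t) (k := t.length - 1 - r) (by omega)
  rw [hget] at this
  unfold fI lI
  omega

theorem pm_succ {t : List Int} {k : Nat} (h1 : 1 ≤ k) (hk : k < t.length) :
    minv (t.take (k + 1)) = min (minv (t.take k)) (t[k]'hk) := by
  have hsnoc : t.take (k + 1) = t.take k ++ [t[k]'hk] := by
    rw [List.take_succ]
    simp [List.getElem?_eq_getElem hk]
  have hne : t.take k ≠ [] := by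
    intro h
    have := congrArg List.length h
    simp only [List.length_take, List.length_nil] at this
    omega
  rw [hsnoc, minv_snoc hne]

theorem sm_succ {t : List Int} {j : Nat} (h : j + 1 < t.length) :
    minv (t.drop j) = min (t[j]'(by omega)) (minv (t.drop (j + 1))) := by
  have hne : t.drop (j+1) ≠ [] := by
    intro h'; have := congrArg List.length h'; simp at this; omega
  rw [List.drop_eq_getElem_cons (by omega), minv_cons' _ hne]


theorem lm_loop (t : List Int) (ht : t ≠ []) (k : Nat) (h1 : 1 ≤ k) (hk : k ≤ t.length) :
    ((PySem.List.pyRange 1 (k : Int) 1).foldl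
      (fun lm i => PySem.List.pySetD lm i
        (min (PySem.List.pyGetD lm (i - 1) 0) (PySem.List.pyGetD t i 0)))
      (PySem.List.pySetD (List.replicate t.length 0) 0 (PySem.List.pyGetD t 0 0))).length = t.length ∧
    ∀ (j : Nat), j < t.length →
      PySem.List.pyGetD ((PySem.List.pyRange 1 (k : Int) 1).foldl
        (fun lm i => PySem.List.pySetD lm i
          (min (PySem.List.pyGetD lm (i - 1) 0) (PySem.List.pyGetD t i 0)))
        (PySem.List.pySetD (List.replicate t.length 0) 0 (PySem.List.pyGetD t 0 0))) (j : Int) 0 =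
      if j < k then minv (t.take (j + 1)) else 0 := by
  obtain ⟨x, xs, rfl⟩ := List.exists_cons_of_ne_nil ht
  induction k, h1 using Nat.le_induction with
  | base =>
    rw [show ((1:Nat):Int) = 1 by norm_num, PySem.List.pyRange_one_eq_nil (le_refl 1)]
    simp only [List.foldl_nil]
    rw [PySem.List.pyGetD_zero_cons,
        show PySem.List.pySetD (List.replicate (x :: xs).length (0:Int)) 0 x
           = PySem.List.pySetD (List.replicate (x :: xs).length (0:Int)) ((0:Nat):Int) x by norm_num]
    constructor
    · simp [PySem.List.length_pySetD]
    · intro j hj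
      rw [PySem.List.pyGetD_pySetD_natCast _ 0 j _ _ (by simp)]
      split_ifs with hc hlt
      · subst hc
        simp [minv_cons]
      · omega
      · omega
      · rw [PySem.List.pyGetD_natCast]
        simp
  | succ k hk1 ih =>
    have hkle : k ≤ (x :: xs).length := by omega
    obtain ⟨ihlen, ihget⟩ := ih hkle
    rw [show (((k+1:Nat)):Int) = (k:Int) + 1 by push_cast; ring,
        PySem.List.pyRange_one_succ_right (by exact_mod_cast hk1),
        List.foldl_append]
    simp only [List.foldl_cons, List.foldl_nil]
    set L := (PySem.List.pyRange 1 (k : Int) 1).foldl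
        (fun lm i => PySem.List.pySetD lm i
          (min (PySem.List.pyGetD lm (i - 1) 0) (PySem.List.pyGetD (x :: xs) i 0)))
        (PySem.List.pySetD (List.replicate (x :: xs).length 0) 0 (PySem.List.pyGetD (x :: xs) 0 0)) with hL
    have hkn : k < (x :: xs).length := by omega
    have e1 : (k : Int) - 1 = ((k - 1 : Nat) : Int) := by omega
    have e2 : PySem.List.pyGetD L ((k:Int) - 1) 0 = minv ((x :: xs).take k) := by
      rw [e1, ihget (k-1) (by omega)]
      have hlt : k - 1 < k := by omega
      simp only [hlt, if_true]
      congr 2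
      omega
    have e3 : PySem.List.pyGetD (x :: xs) (k : Int) 0 = (x :: xs)[k]'hkn := by
      rw [PySem.List.pyGetD_natCast, List.getD_eq_getElem]
    rw [e2, e3]
    constructor
    · simp [ihlen]
    · intro j hj
      rw [PySem.List.pyGetD_pySetD_natCast _ k j _ _ (by rw [ihlen]; exact hkn)]
      split_ifs with hc hlt
      · subst hc
        rw [← pm_succ hk1 hkn]
      · omega
      · rw [ihget j hj]
        have : j < k := by omega
        simp [this]
      · rw [ihget j hj]
        have : ¬ j < k := by omega
        simp [this]

theorem rm_loop (t : List Int) (k : Nat) (hk : k + 2 ≤ t.length) :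
    ∀ (R : List Int), R.length = t.length →
    (∀ (j : Nat), j < t.length → k < j → PySem.List.pyGetD R (j : Int) 0 = minv (t.drop j)) →
    (((PySem.List.pyRange (k : Int) (-1) (-1)).foldl
        (fun rm i => PySem.List.pySetD rm i
          (min (PySem.List.pyGetD rm (i + 1) 0) (PySem.List.pyGetD t i 0))) R).length = t.length ∧
     ∀ (j : Nat), j < t.length →
      PySem.List.pyGetD ((PySem.List.pyRange (k : Int) (-1) (-1)).foldl
        (fun rm i => PySem.List.pySetD rm i
          (min (PySem.List.pyGetD rm (i + 1) 0) (PySem.List.pyGetD t i 0))) R) (j : Int) 0 =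
      minv (t.drop j)) := by
  induction k with
  | zero =>
    intro R hlen hinv
    rw [show ((0:Nat):Int) = 0 by norm_num, PySem.List.pyRange_neg_one_cons (by norm_num),
        show (0:Int) - 1 = -1 by norm_num, PySem.List.pyRange_neg_one_eq_nil (le_refl _)]
    simp only [List.foldl_cons, List.foldl_nil]
    have e1 : PySem.List.pyGetD R ((0:Int) + 1) 0 = minv (t.drop 1) := by
      rw [show (0:Int) + 1 = ((1:Nat):Int) by norm_num]
      exact hinv 1 (by omega) (by omega)
    have e2 : PySem.List.pyGetD t (0:Int) 0 = t[0]'(by omega) := by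
      rw [show (0:Int) = ((0:Nat):Int) by norm_num, PySem.List.pyGetD_natCast,
          List.getD_eq_getElem]
    rw [e1, e2,
        show PySem.List.pySetD R 0 (min (minv (t.drop 1)) (t[0]'(by omega)))
           = PySem.List.pySetD R ((0:Nat):Int) (min (minv (t.drop 1)) (t[0]'(by omega))) by norm_num]
    constructor
    · simp [PySem.List.length_pySetD, hlen]
    · intro j hj
      rw [PySem.List.pyGetD_pySetD_natCast _ 0 j _ _ (by omega)]
      split_ifs with hc
      · subst hc
        have e3 : minv (t.drop 0) = min (t[0]'(by omega)) (minv (t.drop 1)) := by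
          have := sm_succ (t := t) (j := 0) (by omega)
          simpa using this
        rw [e3, min_comm]
      · exact hinv j hj (by omega)
  | succ k ih =>
    intro R hlen hinv
    rw [show (((k+1:Nat)):Int) = (k:Int) + 1 by push_cast; ring,
        PySem.List.pyRange_neg_one_cons (by exact_mod_cast by omega : (-1:Int) < (k:Int)+1),
        show (k:Int) + 1 - 1 = (k:Int) by ring]
    simp only [List.foldl_cons]
    have hk2 : k + 2 < t.length := by omega
    have e1 : PySem.List.pyGetD R ((k:Int) + 1 + 1) 0 = minv (t.drop (k+2)) := by
      rw [show (k:Int) + 1 + 1 = ((k+2:Nat):Int) by push_cast; ring]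
      exact hinv (k+2) (by omega) (by omega)
    have e2 : PySem.List.pyGetD t ((k:Int)+1) 0 = t[k+1]'(by omega) := by
      rw [show (k:Int) + 1 = ((k+1:Nat):Int) by push_cast; ring, PySem.List.pyGetD_natCast,
          List.getD_eq_getElem]
    rw [e1, e2,
        show PySem.List.pySetD R ((k:Int)+1) (min (minv (t.drop (k+2))) (t[k+1]'(by omega)))
           = PySem.List.pySetD R ((((k+1):Nat)):Int) (min (minv (t.drop (k+2))) (t[k+1]'(by omega))) by push_cast; ring_nf]
    refine ih (by omega) _ ?_ ?_
    · simp [PySem.List.length_pySetD, hlen]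
    · intro j hj hkj
      rw [PySem.List.pyGetD_pySetD_natCast _ (k+1) j _ _ (by omega)]
      split_ifs with hc
      · subst hc
        have e3 : minv (t.drop (k+1)) = min (t[k+1]'(by omega)) (minv (t.drop (k+2))) := by
          have := sm_succ (t := t) (j := k+1) (by omega)
          simpa using this
        rw [e3, min_comm]
      · exact hinv j hj (by omega)

theorem cnt (F L : Nat) (hFL : F ≤ L) :
    ∀ (m : Nat) (P : Nat → Prop) [DecidablePred P], (∀ k, k < m → (P k ↔ (F ≤ k ∧ k < L))) →
    (List.range m).foldl (fun (c : Int) k => if P k then c + 1 else c) 0 =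
      ((min m L : Nat) : Int) - ((min m F : Nat) : Int) := by
  intro m
  induction m with
  | zero => intro P _ hP; simp
  | succ m ih =>
    intro P _ hP
    rw [List.range_succ, List.foldl_append]
    rw [ih P (fun k hk => hP k (by omega))]
    simp only [List.foldl_cons, List.foldl_nil]
    by_cases hc : P m
    · rw [if_pos hc]
      have := (hP m (by omega)).1 hc
      omega
    · rw [if_neg hc]
      have := fun h => hc ((hP m (by omega)).2 h)
      have h2 : ¬ (F ≤ m ∧ m < L) := this
      omega

theorem B_loop (x : Int) (ys : List Int) :
    (PySem.List.enumerate ys 1).foldl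
      (fun (s : Int × Int × Int) (p : Int × Int) =>
        if p.2 < s.1 then (p.2, p.1, p.1)
        else if p.2 = s.1 then (s.1, s.2.1, p.1)
        else s) (x, 0, 0) =
    (minv (x :: ys), (fI (x :: ys) : Int), (lI (x :: ys) : Int)) := by
  induction ys using List.reverseRecOn with
  | nil =>
    simp [PySem.List.enumerate, minv_cons, fI, lI]
  | append_singleton ys y ih =>
    rw [show x :: (ys ++ [y]) = (x :: ys) ++ [y] by simp]
    rw [PySem.List.enumerate_append, List.foldl_append, ih]
    simp only [PySem.List.enumerate_cons, PySem.List.enumerate_nil,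
      List.foldl_cons, List.foldl_nil]
    set p := x :: ys with hp
    have hpne : p ≠ [] := by simp [hp]
    have hrev : (p ++ [y]).reverse = y :: p.reverse := by
      rw [List.reverse_append]; rfl
    have hlenp : (p ++ [y]).length = p.length + 1 := by simp
    by_cases h1 : y < minv p
    · rw [if_pos h1]
      have hm : minv (p ++ [y]) = y := by
        rw [minv_snoc hpne]; omega
      have hnm : y ∉ p := fun hmem => absurd (minv_le hmem) (by omega)
      have hf : fI (p ++ [y]) = p.length := by
        unfold fI
        rw [hm, List.idxOf_append_of_notMem hnm]
        simp [List.idxOf_cons_self]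
      have hl : lI (p ++ [y]) = p.length := by
        unfold lI
        rw [hm, hlenp, hrev, List.idxOf_cons_self]
        omega
      rw [hm, hf, hl]
      have : (1 : Int) + (ys.length : Int) = ((p.length : Nat) : Int) := by
        simp [hp]; omega
      simp [this]
    · rw [if_neg h1]
      have hm : minv (p ++ [y]) = minv p := by
        rw [minv_snoc hpne]; omega
      have hmemp : minv p ∈ p := minv_mem hpne
      have hf : fI (p ++ [y]) = fI p := by
        unfold fI
        rw [hm, List.idxOf_append_of_mem hmemp]
      by_cases h2 : y = minv p
      · rw [if_pos h2]
        have hl : lI (p ++ [y]) = p.length := by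
          unfold lI
          rw [hm, hlenp, hrev, h2, List.idxOf_cons_self]
          omega
        rw [hm, hf, hl]
        have : (1 : Int) + (ys.length : Int) = ((p.length : Nat) : Int) := by
          simp [hp]; omega
        simp [this]
      · rw [if_neg h2]
        have hr : p.reverse.idxOf (minv p) < p.length := by
          have := List.idxOf_lt_length_of_mem ((List.mem_reverse).2 hmemp)
          simpa using this
        have hl : lI (p ++ [y]) = lI p := by
          unfold lI
          rw [hm, hlenp, hrev, List.idxOf_cons_ne _ h2]
          omega
        rw [hm, hf, hl]

theorem B_eq (t : List Int) (ht : t ≠ []) :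
    count_alt t = ((lI t : Int) - (fI t : Int)) := by
  obtain ⟨x, xs, rfl⟩ := List.exists_cons_of_ne_nil ht
  unfold count_alt
  simp only [PySem.List.slice_from_one, List.tail_cons, PySem.List.pyGetD_zero_cons]
  rw [B_loop]

theorem A_eq (t : List Int) (ht : t ≠ []) :
    count t = ((lI t : Int) - (fI t : Int)) := by
  have hn : 1 ≤ t.length := List.length_pos_of_ne_nil ht
  by_cases hn1 : t.length = 1
  · obtain ⟨x, xs, rfl⟩ := List.exists_cons_of_ne_nil ht
    have hxs : xs = [] := by simpa using hn1
    subst hxs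
    simp only [count]
    rw [show ((([x]:List Int).length : Int)) = 1 by norm_num]
    rw [PySem.List.pyRange_one_eq_nil (le_refl 1),
        show (1:Int) - 2 = -1 by norm_num,
        PySem.List.pyRange_neg_one_eq_nil (le_refl _)]
    simp [fI, lI, minv_cons, List.idxOf_cons_self]
  · have hn2 : 2 ≤ t.length := by
      rcases Nat.lt_or_ge t.length 2 with h | h
      · omega
      · exact h
    simp only [count]
    set n := t.length with hndef
    -- the left-minimum array
    obtain ⟨Llen, Lget⟩ := lm_loop t ht n hn (le_refl _)
    set L := (PySem.List.pyRange 1 (n : Int) 1).foldl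
      (fun lm i => PySem.List.pySetD lm i
        (min (PySem.List.pyGetD lm (i - 1) 0) (PySem.List.pyGetD t i 0)))
      (PySem.List.pySetD (List.replicate t.length 0) 0 (PySem.List.pyGetD t 0 0)) with hLdef
    -- the initial right array
    set R0 := PySem.List.pySetD (List.replicate t.length 0) ((n:Int) - 1)
        (PySem.List.pyGetD t ((n:Int) - 1) 0) with hR0def
    have hR0len : R0.length = n := by
      rw [hR0def, PySem.List.length_pySetD, List.length_replicate]
    have e1 : (n : Int) - 1 = ((n - 1 : Nat) : Int) := by omega
    have hdrop : t.drop (n - 1) = [t[n-1]'(by omega)] := by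
      rw [List.drop_eq_getElem_cons (by omega : n - 1 < t.length)]
      congr 1
      rw [show n - 1 + 1 = n by omega, hndef]
      exact List.drop_length
    have hlast : minv (t.drop (n - 1)) = t[n-1]'(by omega) := by
      rw [hdrop, minv_cons]
      rfl
    have hR0inv : ∀ (j : Nat), j < n → (n - 2) < j →
        PySem.List.pyGetD R0 (j : Int) 0 = minv (t.drop j) := by
      intro j hj hj2
      have hjn : j = n - 1 := by omega
      subst hjn
      rw [hR0def, e1, PySem.List.pyGetD_pySetD_natCast _ (n-1) (n-1) _ _ (by simp; omega)]
      rw [if_pos rfl, PySem.List.pyGetD_natCast, List.getD_eq_getElem _ _ (by omega), hlast]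
    obtain ⟨Rlen, Rget⟩ := by
      refine rm_loop t (n - 2) (by omega) R0 (by rw [hR0len]) hR0inv
    rw [show (n : Int) - 2 = ((n - 2 : Nat) : Int) by omega] 
    set R := (PySem.List.pyRange ((n - 2 : Nat) : Int) (-1) (-1)).foldl
      (fun rm i => PySem.List.pySetD rm i
        (min (PySem.List.pyGetD rm (i + 1) 0) (PySem.List.pyGetD t i 0))) R0 with hRdef
    -- the counting loop
    rw [PySem.List.pyRange_one 1 (n : Int),
        show (((n : Int) - 1)).toNat = n - 1 by omega,
        List.foldl_map]
    have hFL : fI t ≤ lI t := fI_le_lI ht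
    have hr : t.reverse.idxOf (minv t) < n := by
      have := List.idxOf_lt_length_of_mem ((List.mem_reverse).2 (minv_mem ht))
      simpa using this
    have hL1 : lI t ≤ n - 1 := by unfold lI; omega
    have hPP : ∀ (k : Nat), k < n - 1 →
        ((PySem.List.pyGetD L (1 + (k:Int) - 1) 0 = PySem.List.pyGetD R (1 + (k:Int)) 0) ↔
         (fI t ≤ k ∧ k < lI t)) := by
      intro k hk
      have ek : (1:Int) + (k:Int) - 1 = ((k:Nat):Int) := by ring
      have ek2 : (1:Int) + (k:Int) = (((k+1:Nat)):Int) := by push_cast; ring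
      rw [ek, ek2, Lget k (by omega), Rget (k+1) (by omega)]
      have : k < n := by omega
      simp only [this, if_true]
      rw [key_iff ht (by omega : 1 ≤ k + 1) (by omega : k + 1 < t.length)]
      omega
    have hc := cnt (fI t) (lI t) hFL (n - 1)
      (fun k => PySem.List.pyGetD L (1 + (k:Int) - 1) 0 = PySem.List.pyGetD R (1 + (k:Int)) 0)
      hPP
    rw [hc]
    have h1 : min (n-1) (lI t) = lI t := by omega
    have h2 : min (n-1) (fI t) = fI t := by omega
    rw [h1, h2]

-- ===== VERDICT (by name: the statement is the Claim_ definition above) =====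
theorem count_spec : Claim_equal_count := by
  intro t _ hpre
  unfold Spec_count
  rw [A_eq t hpre, B_eq t hpre]
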